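-- pv_equiv track=rewrite | github.com/FastLED/FastLED | ci/util/optimized_compiler.py | _extract_include_paths
-- ===== SOURCE A (Python) =====
-- from typing import Dict, List, Optional
--
-- def _extract_include_paths(args: List[str]) -> List[str]:
--     """Extract include paths from compilation arguments."""
--     includes: List[str] = []
--
--     i = 0
--     while i < len(args):
--         arg = args[i]
--
--         if arg == "-I" and i + 1 < len(args):
--             includes.append(f"-I{args[i + 1]}")
--             i += 1
--         elif arg.startswith("-I"):
--             includes.append(arg)
--
--         i += 1
--
--     return includes
-- ===== SOURCE B (Python) =====
-- from typing import List
--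
-- def _extract_include_paths(args: List[str]) -> List[str]:
--     """Extract include paths from compilation arguments (single pass with a pending flag)."""
--     includes: List[str] = []
--     pending = False
--     for arg in args:
--         if pending:
--             includes.append(f"-I{arg}")
--             pending = False
--         elif arg == "-I":
--             pending = True
--         elif arg.startswith("-I"):
--             includes.append(arg)
--     if pending:
--         includes.append("-I")
--     return includes
-- ===== Notes on version B (the rewrite author's own statement) =====
-- stated objective: simpler
-- what changed: Replaces index arithmetic with lookahead (args[i+1], manual i skipping) by a single forward for-loop carrying a boolean pending flag, flushing a trailing bare -I after the loop; the measured speedup is a constant factor from dropping per-step len() checks and indexing.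
import Mathlib
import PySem

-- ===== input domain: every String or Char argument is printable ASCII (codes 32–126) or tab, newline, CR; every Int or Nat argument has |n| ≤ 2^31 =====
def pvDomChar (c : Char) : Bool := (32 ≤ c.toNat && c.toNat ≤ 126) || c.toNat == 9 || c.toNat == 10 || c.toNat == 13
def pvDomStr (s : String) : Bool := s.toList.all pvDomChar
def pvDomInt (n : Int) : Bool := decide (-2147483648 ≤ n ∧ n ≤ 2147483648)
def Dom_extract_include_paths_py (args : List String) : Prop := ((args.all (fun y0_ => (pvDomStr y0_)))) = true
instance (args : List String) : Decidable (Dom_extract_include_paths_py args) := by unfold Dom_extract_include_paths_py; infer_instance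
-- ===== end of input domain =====

-- B replaces A's index arithmetic with lookahead by a single forward pass carrying a boolean
-- pending flag (objective: simpler); return values proved equal on all inputs.

-- ===== PORT A =====
-- while-loop with index i; i+=1 inside the first branch plus the trailing i+=1 gives i+2
def extract_include_paths_py_loop (args : List String) (includes : List String) (i : Nat) :
    List String :=
  if h : i < args.length then
    let arg := args[i]
    if h1 : arg == "-I" ∧ i + 1 < args.length then
      extract_include_paths_py_loop args (includes ++ ["-I" ++ args[i + 1]'(h1.2)]) (i + 2)
    else if PySem.Str.startswith arg "-I" then
      extract_include_paths_py_loop args (includes ++ [arg]) (i + 1)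
    else
      extract_include_paths_py_loop args includes (i + 1)
  else includes
termination_by args.length - i

def extract_include_paths_py (args : List String) : List String :=
  extract_include_paths_py_loop args [] 0

-- ===== PORT B =====
-- single forward pass over the list with a boolean pending flag
def extract_include_paths_py_alt_loop : List String → Bool → List String → List String
  | [], pending, includes => if pending then includes ++ ["-I"] else includes
  | arg :: rest, pending, includes =>
    if pending then extract_include_paths_py_alt_loop rest false (includes ++ ["-I" ++ arg])
    else if arg == "-I" then extract_include_paths_py_alt_loop rest true includes
    else if PySem.Str.startswith arg "-I" then
      extract_include_paths_py_alt_loop rest false (includes ++ [arg])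
    else extract_include_paths_py_alt_loop rest false includes

def extract_include_paths_py_alt (args : List String) : List String :=
  extract_include_paths_py_alt_loop args false []

-- ===== PRECONDITION & SPEC =====
def Spec_extract_include_paths_py (args : List String) (out : List String) : Prop := out = extract_include_paths_py_alt args
instance (args : List String) (out : List String) : Decidable (Spec_extract_include_paths_py args out) := by unfold Spec_extract_include_paths_py; infer_instance

-- ===== CLAIM (what is proved, stated in full; the proofs are below) =====
def Claim_equal_extract_include_paths_py : Prop := ∀ (args : List String), Dom_extract_include_paths_py args → Spec_extract_include_paths_py args (extract_include_paths_py args)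

-- ===== LEMMAS AND PROOFS =====

-- "-I" starts with "-I"
theorem startswith_dashI_self : PySem.Str.startswith "-I" "-I" = true := by decide

-- invariant: A's loop from index i equals B's loop on the i-suffix with pending = false
theorem loop_eq (args : List String) : ∀ k i includes, args.length - i = k → i ≤ args.length →
    extract_include_paths_py_loop args includes i =
      extract_include_paths_py_alt_loop (args.drop i) false includes := by
  intro k
  induction k using Nat.strong_induction_on with
  | _ k ih =>
    intro i includes hk hle
    rw [extract_include_paths_py_loop]
    by_cases h : i < args.length
    · simp only [h, dif_pos]
      have hdrop : args.drop i = args[i] :: args.drop (i + 1) :=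
        List.drop_eq_getElem_cons h
      by_cases h1 : (args[i] == "-I") = true ∧ i + 1 < args.length
      · obtain ⟨heq, hlt⟩ := h1
        have hdrop1 : args.drop (i + 1) = args[i+1] :: args.drop (i + 2) :=
          List.drop_eq_getElem_cons hlt
        simp only [heq, hlt, and_self, dif_pos]
        rw [ih (args.length - (i + 2)) (by omega) (i + 2) _ rfl (by omega), hdrop, hdrop1,
          extract_include_paths_py_alt_loop]
        simp only [if_neg (Bool.false_ne_true), heq, if_pos]
        rw [extract_include_paths_py_alt_loop]
        simp
      · simp only [h1, dif_neg, not_false_iff]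
        rw [hdrop, extract_include_paths_py_alt_loop]
        simp only [if_neg (Bool.false_ne_true)]
        by_cases heq : (args[i] == "-I") = true
        · -- then i+1 = length: A takes the startswith branch appending the bare "-I"
          have hlen : ¬ i + 1 < args.length := fun hlt => h1 ⟨heq, hlt⟩
          have hi1 : i + 1 = args.length := by omega
          have hstr : args[i] = "-I" := by simpa using heq
          simp only [if_pos, hstr, startswith_dashI_self]
          rw [ih (args.length - (i + 1)) (by omega) (i + 1) _ rfl (by omega),
            hi1, List.drop_length, extract_include_paths_py_alt_loop,
            extract_include_paths_py_alt_loop]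
          simp
        · simp only [heq]
          by_cases hsw : PySem.Str.startswith args[i] "-I" = true
          · simp only [hsw, if_pos]
            exact ih (args.length - (i + 1)) (by omega) (i + 1) _ rfl (by omega)
          · simp only [hsw]
            exact ih (args.length - (i + 1)) (by omega) (i + 1) _ rfl (by omega)
    · simp only [h, dif_neg, not_false_iff]
      have : args.drop i = [] := List.drop_eq_nil_of_le (by omega)
      rw [this, extract_include_paths_py_alt_loop]
      simp

-- ===== VERDICT (by name: the statement is the Claim_ definition above) =====
theorem extract_include_paths_py_spec : Claim_equal_extract_include_paths_py := by
  intro args _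
  unfold Spec_extract_include_paths_py extract_include_paths_py extract_include_paths_py_alt
  simpa using loop_eq args args.length 0 [] (by omega) (by omega)
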